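-- pv_equiv track=rewrite | github.com/diego-vilca/UNSAM | ejercicios_python/Clase04/propaga.py | propagar
-- ===== SOURCE A (Python) =====
-- def propagar(vector):
--     lista = []
--     lista = list(vector)
--
--
--     for i, e in enumerate(lista):
--
--         # Busco el fosforo encendido
--         if e == 1:
--             # recorro los fosforos de la derecha
--             for s in range(i + 1, len(vector), 1):
--                 # si encuentro uno carbonizado dejo de quemar
--                 if lista[s]  == -1:
--                     break
--                 else: # ...sino quemo
--                     lista[s] = 1
--             # recorro hacia la izquierda
--             for t in range(i - 1, -1, -1):
--                 # si encuentro uno carbonizado dejo de quemar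
--                 if lista[t]  == -1:
--                     break
--                 else: # ...sino quemo
--                     lista[t] = 1
--
--     return lista
-- ===== SOURCE B (Python) =====
-- def propagar(vector):
--     # Split on -1 barriers; a segment becomes all 1s iff it contains a 1.
--     out = []
--     seg = []
--     for e in vector:
--         if e == -1:
--             out.extend([1] * len(seg) if 1 in seg else seg)
--             out.append(-1)
--             seg = []
--         else:
--             seg.append(e)
--     out.extend([1] * len(seg) if 1 in seg else seg)
--     return out
-- ===== Notes on version B (the rewrite author's own statement) =====
-- stated objective: alternative
-- what changed: Replaces A's per-index rescans (for every 1, burn right and left until a -1) with a single pass that splits the vector on -1 barriers and fills each segment entirely with 1s iff it contains a 1.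
import Mathlib
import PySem

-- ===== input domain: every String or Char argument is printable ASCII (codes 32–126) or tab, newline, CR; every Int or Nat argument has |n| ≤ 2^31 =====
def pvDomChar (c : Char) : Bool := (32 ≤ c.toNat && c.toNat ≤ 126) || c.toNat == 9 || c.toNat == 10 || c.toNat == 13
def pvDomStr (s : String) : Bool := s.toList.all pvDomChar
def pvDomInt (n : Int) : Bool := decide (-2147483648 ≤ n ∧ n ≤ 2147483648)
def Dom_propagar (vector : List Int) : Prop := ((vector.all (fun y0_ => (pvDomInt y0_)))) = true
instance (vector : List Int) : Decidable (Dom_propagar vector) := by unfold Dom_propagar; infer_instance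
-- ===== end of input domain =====

-- B replaces A's per-index left/right burn scans by a single pass that splits the
-- list on -1 barriers and fills a segment with 1s iff it contains a 1 (alternative
-- algorithm; return value proved equal on all inputs).

-- ===== PORT A =====
-- inner right-burn loop: overwrite elements with 1 until the first -1 (break)
def burnRight : List Int → List Int
  | [] => []
  | x :: xs => if x = -1 then x :: xs else 1 :: burnRight xs

-- body of A's outer loop at index i: if lista[i] == 1, burn right from i+1,
-- then burn left from i-1 down to 0 (ported as burnRight over the reversed prefix)
def stepA (l : List Int) (i : Nat) : List Int :=
  if l.getD i 0 = 1 then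
    (burnRight ((l.take (i + 1) ++ burnRight (l.drop (i + 1))).take i).reverse).reverse
      ++ (l.take (i + 1) ++ burnRight (l.drop (i + 1))).drop i
  else l

def propagar (vector : List Int) : List Int :=
  (List.range vector.length).foldl stepA vector

-- ===== PORT B =====
-- [1]*len(seg) if 1 in seg else seg
def fillB (seg : List Int) : List Int :=
  if (1 : Int) ∈ seg then List.replicate seg.length 1 else seg

def stepB (acc : List Int × List Int) (e : Int) : List Int × List Int :=
  if e = -1 then (acc.1 ++ fillB acc.2 ++ [-1], []) else (acc.1, acc.2 ++ [e])

def propagar_alt (vector : List Int) : List Int :=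
  let r := vector.foldl stepB ([], [])
  r.1 ++ fillB r.2

-- ===== PRECONDITION & SPEC =====
def Spec_propagar (vector : List Int) (out : List Int) : Prop := out = propagar_alt vector
instance (vector : List Int) (out : List Int) : Decidable (Spec_propagar vector out) := by unfold Spec_propagar; infer_instance

-- ===== CLAIM (what is proved, stated in full; the proofs are below) =====
def Claim_equal_propagar : Prop := ∀ (vector : List Int), Dom_propagar vector → Spec_propagar vector (propagar vector)

-- ===== LEMMAS AND PROOFS =====

theorem burnRight_length (l : List Int) : (burnRight l).length = l.length := by
  induction l with
  | nil => rfl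
  | cons x xs ih => unfold burnRight; split <;> simp [ih]

theorem burnRight_append_neg (x y : List Int) :
    burnRight (x ++ (-1) :: y) = burnRight x ++ (-1) :: y := by
  induction x with
  | nil => simp [burnRight]
  | cons c x ih => by_cases h : c = -1 <;> simp [burnRight, h, ih]

theorem burnRight_no_neg (x : List Int) (h : (-1 : Int) ∉ x) :
    burnRight x = List.replicate x.length 1 := by
  induction x with
  | nil => rfl
  | cons c x ih =>
    simp only [List.mem_cons, not_or] at h
    rw [burnRight, if_neg (fun hc => h.1 hc.symm), ih h.2]
    simp [List.replicate_succ]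

theorem getD_app_left (a b : List Int) (i : Nat) (h : i < a.length) :
    (a ++ b).getD i 0 = a.getD i 0 := by
  simp [List.getD, List.getElem?_append_left h]

theorem getD_app_right (a b : List Int) (i : Nat) (h : a.length ≤ i) :
    (a ++ b).getD i 0 = b.getD (i - a.length) 0 := by
  simp [List.getD, List.getElem?_append_right h]

theorem getD_lt_length (l : List Int) (i : Nat) (h : l.getD i 0 = 1) : i < l.length := by
  by_contra hc
  rw [List.getD_eq_default _ _ (by omega)] at h
  exact absurd h (by decide)

theorem stepA_length (l : List Int) (i : Nat) : (stepA l i).length = l.length := by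
  unfold stepA
  split
  · simp [burnRight_length]
    omega
  · rfl

theorem stepA_not_one (l : List Int) (i : Nat) (h : l.getD i 0 ≠ 1) : stepA l i = l := by
  unfold stepA
  rw [if_neg h]

theorem getD_not_one (l : List Int) (h : (1 : Int) ∉ l) (i : Nat) : l.getD i 0 ≠ 1 := by
  intro hc
  have hi := getD_lt_length l i hc
  have : l.getD i 0 = l[i] := by simp [List.getD, List.getElem?_eq_getElem hi]
  rw [this] at hc
  exact h (hc ▸ List.getElem_mem hi)

theorem stepA_append (a b : List Int) (i : Nat) (hi : i < a.length) :
    stepA (a ++ (-1) :: b) i = stepA a i ++ (-1) :: b := by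
  have hg : (a ++ (-1) :: b).getD i 0 = a.getD i 0 := getD_app_left _ _ _ hi
  by_cases h1 : a.getD i 0 = 1
  · unfold stepA
    rw [hg, if_pos h1, if_pos h1]
    have ht1 : (a ++ (-1) :: b).take (i + 1) = a.take (i + 1) :=
      List.take_append_of_le_length (by omega)
    have hd1 : (a ++ (-1) :: b).drop (i + 1) = a.drop (i + 1) ++ (-1) :: b :=
      List.drop_append_of_le_length (by omega)
    rw [ht1, hd1, burnRight_append_neg,
        show a.take (i + 1) ++ (burnRight (a.drop (i + 1)) ++ (-1) :: b)
           = (a.take (i + 1) ++ burnRight (a.drop (i + 1))) ++ (-1) :: b by simp]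
    set Y := a.take (i + 1) ++ burnRight (a.drop (i + 1)) with hY
    have hlen : Y.length = a.length := by
      simp [hY, burnRight_length]; omega
    have ht2 : (Y ++ (-1) :: b).take i = Y.take i :=
      List.take_append_of_le_length (by omega)
    have hd2 : (Y ++ (-1) :: b).drop i = Y.drop i ++ (-1) :: b :=
      List.drop_append_of_le_length (by omega)
    rw [ht2, hd2]
    simp
  · rw [stepA_not_one _ _ (hg ▸ h1), stepA_not_one _ _ h1]

theorem stepA_barrier (a b : List Int) : stepA (a ++ (-1) :: b) a.length = a ++ (-1) :: b := by
  apply stepA_not_one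
  rw [getD_app_right a _ _ (le_refl _)]
  simp [List.getD]

theorem stepA_shift (a b : List Int) (j : Nat) :
    stepA (a ++ (-1) :: b) (a.length + 1 + j) = a ++ (-1) :: stepA b j := by
  have hg : (a ++ (-1) :: b).getD (a.length + 1 + j) 0 = b.getD j 0 := by
    rw [getD_app_right a _ _ (by omega)]
    have : a.length + 1 + j - a.length = j + 1 := by omega
    rw [this]
    simp [List.getD]
  by_cases h1 : b.getD j 0 = 1
  · have hjb : j < b.length := getD_lt_length b j h1
    unfold stepA
    rw [hg, if_pos h1, if_pos h1]
    have ht1 : (a ++ (-1) :: b).take (a.length + 1 + j + 1) = a ++ (-1) :: b.take (j + 1) := by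
      rw [List.take_append, List.take_of_length_le (by omega)]
      congr 1
      have : a.length + 1 + j + 1 - a.length = j + 1 + 1 := by omega
      rw [this, List.take_succ_cons]
    have hd1 : (a ++ (-1) :: b).drop (a.length + 1 + j + 1) = b.drop (j + 1) := by
      rw [List.drop_append, List.drop_of_length_le (by omega)]
      have : a.length + 1 + j + 1 - a.length = j + 1 + 1 := by omega
      rw [this, List.drop_succ_cons]
      simp
    rw [ht1, hd1,
        show (a ++ (-1) :: b.take (j + 1)) ++ burnRight (b.drop (j + 1))
           = a ++ (-1) :: (b.take (j + 1) ++ burnRight (b.drop (j + 1))) by simp]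
    set b1 := b.take (j + 1) ++ burnRight (b.drop (j + 1)) with hb1
    have hlb1 : j + 1 ≤ b1.length := by
      simp [hb1, burnRight_length]; omega
    have ht2 : (a ++ (-1) :: b1).take (a.length + 1 + j) = a ++ (-1) :: b1.take j := by
      rw [List.take_append, List.take_of_length_le (by omega)]
      congr 1
      have : a.length + 1 + j - a.length = j + 1 := by omega
      rw [this, List.take_succ_cons]
    have hd2 : (a ++ (-1) :: b1).drop (a.length + 1 + j) = b1.drop j := by
      rw [List.drop_append, List.drop_of_length_le (by omega)]
      have : a.length + 1 + j - a.length = j + 1 := by omega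
      rw [this, List.drop_succ_cons]
      simp
    rw [ht2, hd2,
        show (a ++ (-1) :: b1.take j).reverse = (b1.take j).reverse ++ (-1) :: a.reverse by simp,
        burnRight_append_neg]
    simp
  · rw [stepA_not_one _ _ (hg ▸ h1), stepA_not_one _ _ h1]

theorem foldl_stepA_length (idxs : List Nat) (l : List Int) :
    (idxs.foldl stepA l).length = l.length := by
  induction idxs generalizing l with
  | nil => rfl
  | cons i r ih => simp [List.foldl_cons, ih, stepA_length]

theorem foldl_stepA_append (idxs : List Nat) (a b : List Int)
    (h : ∀ i ∈ idxs, i < a.length) :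
    idxs.foldl stepA (a ++ (-1) :: b) = idxs.foldl stepA a ++ (-1) :: b := by
  induction idxs generalizing a with
  | nil => rfl
  | cons i r ih =>
    simp only [List.foldl_cons]
    rw [stepA_append a b i (h i (by simp))]
    exact ih (stepA a i) (fun k hk => stepA_length a i ▸ h k (by simp [hk]))

theorem foldl_stepA_shift (idxs : List Nat) (a b : List Int) :
    (idxs.map (fun j => a.length + 1 + j)).foldl stepA (a ++ (-1) :: b)
      = a ++ (-1) :: idxs.foldl stepA b := by
  induction idxs generalizing b with
  | nil => rfl
  | cons j r ih => simp only [List.map_cons, List.foldl_cons, stepA_shift, ih]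

theorem foldl_stepA_no_one (idxs : List Nat) (l : List Int) (h : (1 : Int) ∉ l) :
    idxs.foldl stepA l = l := by
  induction idxs with
  | nil => rfl
  | cons i r ih => simp [List.foldl_cons, stepA_not_one l i (getD_not_one l h i), ih]

theorem stepA_fire (l : List Int) (i : Nat) (hneg : (-1 : Int) ∉ l)
    (h1 : l.getD i 0 = 1) : stepA l i = List.replicate l.length 1 := by
  have hi : i < l.length := getD_lt_length l i h1
  unfold stepA
  rw [if_pos h1]
  have hdrop : burnRight (l.drop (i + 1)) = List.replicate (l.length - (i + 1)) 1 := by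
    rw [burnRight_no_neg _ (fun hc => hneg (List.mem_of_mem_drop hc))]
    simp
  have htake : (l.take (i + 1) ++ burnRight (l.drop (i + 1))).take i = l.take i := by
    rw [List.take_append_of_le_length (by simp; omega), List.take_take]
    congr 1
    omega
  have hprefix : burnRight (l.take i).reverse = List.replicate i 1 := by
    rw [burnRight_no_neg _ (by
      intro hc
      exact hneg (List.mem_of_mem_take (List.mem_reverse.mp hc)))]
    simp
    omega
  have hdrop2 : (l.take (i + 1) ++ burnRight (l.drop (i + 1))).drop i
      = (l.take (i + 1)).drop i ++ List.replicate (l.length - (i + 1)) 1 := by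
    rw [List.drop_append_of_le_length (by simp; omega), hdrop]
  have hmid : (l.take (i + 1)).drop i = [1] := by
    rw [List.drop_take]
    have h2 : i + 1 - i = 1 := by omega
    rw [h2, List.take_one_drop_eq_of_lt_length hi]
    have hg : l.get ⟨i, hi⟩ = (1 : Int) := by
      have : l.getD i 0 = l[i] := by simp [List.getD, List.getElem?_eq_getElem hi]
      rw [this] at h1
      simpa using h1
    rw [hg]
  rw [htake, hprefix, hdrop2, hmid, List.reverse_replicate]
  rw [show ([1] : List Int) = List.replicate 1 1 from rfl, ← List.append_assoc,
      List.replicate_append_replicate, List.replicate_append_replicate]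
  congr 1
  omega

theorem stepA_ones (n : Nat) (i : Nat) :
    stepA (List.replicate n (1 : Int)) i = List.replicate n 1 := by
  by_cases h : (List.replicate n (1 : Int)).getD i 0 = 1
  · rw [stepA_fire _ _ (by simp) h]
    simp
  · exact stepA_not_one _ _ h

theorem foldl_stepA_ones (idxs : List Nat) (n : Nat) :
    idxs.foldl stepA (List.replicate n (1 : Int)) = List.replicate n 1 := by
  induction idxs with
  | nil => rfl
  | cons i r ih => simp [List.foldl_cons, stepA_ones, ih]

theorem foldl_stepA_fire (idxs : List Nat) (l : List Int) (hneg : (-1 : Int) ∉ l)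
    (h : ∃ i ∈ idxs, l.getD i 0 = 1) :
    idxs.foldl stepA l = List.replicate l.length 1 := by
  induction idxs generalizing l with
  | nil => obtain ⟨i, hi, _⟩ := h; simp at hi
  | cons i r ih =>
    simp only [List.foldl_cons]
    by_cases h1 : l.getD i 0 = 1
    · rw [stepA_fire l i hneg h1, foldl_stepA_ones]
    · rw [stepA_not_one l i h1]
      apply ih l hneg
      obtain ⟨k, hk, hk1⟩ := h
      refine ⟨k, ?_, hk1⟩
      rcases List.mem_cons.mp hk with rfl | hk'
      · exact absurd hk1 h1
      · exact hk'

-- A on a barrier-free list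
theorem propagar_no_neg (l : List Int) (hneg : (-1 : Int) ∉ l) : propagar l = fillB l := by
  unfold propagar fillB
  by_cases h1 : (1 : Int) ∈ l
  · rw [if_pos h1]
    apply foldl_stepA_fire _ _ hneg
    obtain ⟨i, hi, hli⟩ := List.mem_iff_getElem.mp h1
    exact ⟨i, List.mem_range.mpr hi, by simp [List.getD, List.getElem?_eq_getElem hi, hli]⟩
  · rw [if_neg h1]
    exact foldl_stepA_no_one _ _ h1

-- A splits at a barrier
theorem propagar_split (a b : List Int) :
    propagar (a ++ (-1) :: b) = propagar a ++ (-1) :: propagar b := by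
  unfold propagar
  have hlen : (a ++ (-1) :: b).length = a.length + 1 + b.length := by simp; omega
  rw [hlen, List.range_add, List.foldl_append, List.range_add, List.foldl_append]
  rw [foldl_stepA_append _ _ _ (fun i hi => List.mem_range.mp hi)]
  set a' := (List.range a.length).foldl stepA a with ha'
  have hla' : a'.length = a.length := foldl_stepA_length _ _
  have h2 : (List.map (fun x => a.length + x) (List.range 1)).foldl stepA (a' ++ (-1) :: b)
      = a' ++ (-1) :: b := by
    simp only [List.range_one, List.map_cons, List.map_nil, List.foldl_cons, List.foldl_nil]
    rw [show a.length + 0 = a'.length by omega, stepA_barrier]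
  rw [h2]
  have h3 : (List.range b.length).map (fun i => a.length + 1 + i)
      = (List.range b.length).map (fun j => a'.length + 1 + j) := by
    rw [hla']
  rw [h3, foldl_stepA_shift]

-- B side
theorem foldl_stepB_no_neg (a : List Int) (acc : List Int × List Int)
    (hneg : (-1 : Int) ∉ a) :
    a.foldl stepB acc = (acc.1, acc.2 ++ a) := by
  induction a generalizing acc with
  | nil => simp
  | cons c x ih =>
    simp only [List.mem_cons, not_or] at hneg
    rw [List.foldl_cons, show stepB acc c = (acc.1, acc.2 ++ [c]) from by
      unfold stepB; rw [if_neg (fun hc => hneg.1 (Eq.symm hc))]]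
    rw [ih _ hneg.2]
    simp

theorem foldl_stepB_out (b : List Int) (o s : List Int) :
    b.foldl stepB (o, s) = (o ++ (b.foldl stepB ([], s)).1, (b.foldl stepB ([], s)).2) := by
  induction b generalizing o s with
  | nil => simp
  | cons e b ih =>
    simp only [List.foldl_cons]
    by_cases he : e = -1
    · simp only [stepB, if_pos he, List.nil_append]
      rw [ih (o ++ fillB s ++ [-1]) [], ih (fillB s ++ [-1]) []]
      simp
    · simp only [stepB, if_neg he]
      exact ih o (s ++ [e])

theorem propagar_alt_no_neg (l : List Int) (hneg : (-1 : Int) ∉ l) :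
    propagar_alt l = fillB l := by
  unfold propagar_alt
  rw [foldl_stepB_no_neg _ _ hneg]
  simp [fillB]

theorem propagar_alt_split (a b : List Int) (hneg : (-1 : Int) ∉ a) :
    propagar_alt (a ++ (-1) :: b) = fillB a ++ (-1) :: propagar_alt b := by
  unfold propagar_alt
  rw [List.foldl_append, foldl_stepB_no_neg _ _ hneg]
  simp only [List.nil_append, List.foldl_cons]
  rw [show stepB (([], a) : List Int × List Int) (-1) = (fillB a ++ [-1], []) from by
        unfold stepB; rw [if_pos rfl]; simp]
  rw [foldl_stepB_out b (fillB a ++ [-1]) []]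
  simp

theorem first_barrier (l : List Int) (h : (-1 : Int) ∈ l) :
    ∃ a b, l = a ++ (-1) :: b ∧ (-1 : Int) ∉ a := by
  induction l with
  | nil => simp at h
  | cons c x ih =>
    by_cases hc : c = -1
    · exact ⟨[], x, by simp [hc], by simp⟩
    · have hx : (-1 : Int) ∈ x := by
        rcases List.mem_cons.mp h with h' | h'
        · exact absurd h'.symm hc
        · exact h'
      obtain ⟨a, b, rfl, hna⟩ := ih hx
      refine ⟨c :: a, b, rfl, ?_⟩
      simp only [List.mem_cons, not_or]
      exact ⟨fun hh => hc hh.symm, hna⟩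

theorem main_eq : ∀ n (l : List Int), l.length ≤ n → propagar l = propagar_alt l := by
  intro n
  induction n with
  | zero =>
    intro l hl
    cases l with
    | nil => rfl
    | cons c x => simp at hl
  | succ n ih =>
    intro l hl
    by_cases h : (-1 : Int) ∈ l
    · obtain ⟨a, b, rfl, hna⟩ := first_barrier l h
      rw [propagar_split, propagar_alt_split _ _ hna, propagar_no_neg a hna]
      have hb : b.length ≤ n := by simp at hl; omega
      rw [ih b hb]
    · rw [propagar_no_neg l h, propagar_alt_no_neg l h]

-- ===== VERDICT (by name: the statement is the Claim_ definition above) =====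
theorem propagar_spec : Claim_equal_propagar := by
  intro vector _
  unfold Spec_propagar
  exact main_eq vector.length vector (le_refl _)
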